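-- pv_equiv track=rewrite | github.com/bperak/komunikacija_u_doba_ai | scripts/build_pdf.py | _extract_div
-- ===== SOURCE A (Python) =====
-- def _extract_div(html_text: str, css_class: str):
--     """Extract a top-level div by CSS class and return (extracted_html, remaining_html)."""
--     marker = f'<div class="{css_class}">'
--     start = html_text.find(marker)
--     if start < 0:
--         return None, html_text
--     depth = 0
--     i = start
--     end = -1
--     while i < len(html_text):
--         if html_text[i:i+4] == '<div':
--             depth += 1
--         elif html_text[i:i+6] == '</div>':
--             depth -= 1
--             if depth == 0:
--                 end = i + 6
--                 break
--         i += 1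
--     if end < 0:
--         return None, html_text
--     extracted = html_text[start:end]
--     remaining = html_text[:start] + html_text[end:]
--     return extracted, remaining
-- ===== SOURCE B (Python) =====
-- def _extract_div(html_text: str, css_class: str):
--     """Extract a top-level div by CSS class and return (extracted_html, remaining_html)."""
--     marker = f'<div class="{css_class}">'
--     start = html_text.find(marker)
--     if start < 0:
--         return None, html_text
--     n = len(html_text)
--     # pass 1: two ordered lists of tag-event positions from `start` onward
--     opens = [j for j in range(start, n) if html_text[j:j + 4] == '<div']
--     closes = [j for j in range(start, n) if html_text[j:j + 6] == '</div>']
--     # pass 2: merge the two ordered lists, tracking depth, stop at first balance point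
--     depth = 0
--     end = -1
--     while closes:
--         if opens and opens[0] < closes[0]:
--             depth += 1
--             opens = opens[1:]
--         else:
--             depth -= 1
--             if depth == 0:
--                 end = closes[0] + 6
--                 break
--             closes = closes[1:]
--     if end < 0:
--         return None, html_text
--     return html_text[start:end], html_text[:start] + html_text[end:]
-- ===== Notes on version B (the rewrite author's own statement) =====
-- stated objective: alternative
-- what changed: A's single character-by-character scan with inline depth bookkeeping is replaced by two passes: first collect the ordered lists of '<div' and '</div>' event positions, then merge the two ordered lists tracking depth until the first balance point.
import Mathlib
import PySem

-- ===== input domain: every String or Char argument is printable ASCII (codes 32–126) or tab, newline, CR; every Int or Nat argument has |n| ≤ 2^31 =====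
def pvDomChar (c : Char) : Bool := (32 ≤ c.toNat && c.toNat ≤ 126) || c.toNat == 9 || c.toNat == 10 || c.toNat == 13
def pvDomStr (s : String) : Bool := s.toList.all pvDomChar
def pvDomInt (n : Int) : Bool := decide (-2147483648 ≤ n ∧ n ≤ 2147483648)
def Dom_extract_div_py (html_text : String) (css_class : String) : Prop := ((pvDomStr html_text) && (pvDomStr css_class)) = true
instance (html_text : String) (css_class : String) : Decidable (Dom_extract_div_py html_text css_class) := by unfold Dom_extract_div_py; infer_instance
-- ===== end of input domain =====

-- B replaces A's single char-by-char counting loop by two passes — collect the ordered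
-- open/close tag-event position lists, then merge them tracking depth (objective: alternative decomposition).

-- ===== PORT A =====
-- A's while loop: i walks the characters from `start`, updating depth, returning end or -1.
def pvLoopA (cs : List Char) (i : Nat) (d : Int) : Int :=
  if h : i < cs.length then
    if PySem.List.slice cs (some (i : Int)) (some ((i : Int) + 4)) = "<div".toList then
      pvLoopA cs (i + 1) (d + 1)
    else if PySem.List.slice cs (some (i : Int)) (some ((i : Int) + 6)) = "</div>".toList then
      if d - 1 = 0 then (i : Int) + 6 else pvLoopA cs (i + 1) (d - 1)
    else pvLoopA cs (i + 1) d
  else -1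
termination_by cs.length - i
decreasing_by all_goals omega

def extract_div_py (html_text : String) (css_class : String) : Option String × String :=
  let marker := "<div class=\"" ++ css_class ++ "\">"
  let start := PySem.Str.find html_text marker
  if start < 0 then (none, html_text)
  else
    let e := pvLoopA html_text.toList start.toNat 0
    if e < 0 then (none, html_text)
    else
      (some (String.ofList (PySem.List.slice html_text.toList (some start) (some e))),
       String.ofList (PySem.List.slice html_text.toList none (some start) ++
                  PySem.List.slice html_text.toList (some e) none))

-- ===== PORT B =====
-- B's merge loop over the two ordered event-position lists.
def pvMergeB (opens closes : List Int) (d : Int) : Int :=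
  match closes with
  | [] => -1
  | c :: ctl =>
    match opens with
    | o :: otl =>
      if o < c then pvMergeB otl (c :: ctl) (d + 1)
      else if d - 1 = 0 then c + 6 else pvMergeB (o :: otl) ctl (d - 1)
    | [] => if d - 1 = 0 then c + 6 else pvMergeB [] ctl (d - 1)
termination_by opens.length + closes.length
decreasing_by all_goals (simp only [List.length_cons]; omega)

def extract_div_py_alt (html_text : String) (css_class : String) : Option String × String :=
  let marker := "<div class=\"" ++ css_class ++ "\">"
  let start := PySem.Str.find html_text marker
  if start < 0 then (none, html_text)
  else
    let n : Int := html_text.toList.length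
    let opens := (PySem.List.pyRange start n 1).filter
      (fun j => decide (PySem.List.slice html_text.toList (some j) (some (j + 4)) = "<div".toList))
    let closes := (PySem.List.pyRange start n 1).filter
      (fun j => decide (PySem.List.slice html_text.toList (some j) (some (j + 6)) = "</div>".toList))
    let e := pvMergeB opens closes 0
    if e < 0 then (none, html_text)
    else
      (some (String.ofList (PySem.List.slice html_text.toList (some start) (some e))),
       String.ofList (PySem.List.slice html_text.toList none (some start) ++
                  PySem.List.slice html_text.toList (some e) none))

-- ===== PRECONDITION & SPEC =====
def Spec_extract_div_py (html_text : String) (css_class : String) (out : Option String × String) : Prop := out = extract_div_py_alt html_text css_class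
instance (html_text : String) (css_class : String) (out : Option String × String) : Decidable (Spec_extract_div_py html_text css_class out) := by unfold Spec_extract_div_py; infer_instance

-- ===== CLAIM (what is proved, stated in full; the proofs are below) =====
def Claim_equal_extract_div_py : Prop := ∀ (html_text : String) (css_class : String), Dom_extract_div_py html_text css_class → Spec_extract_div_py html_text css_class (extract_div_py html_text css_class)

-- ===== LEMMAS AND PROOFS =====

-- a position cannot be both an opener and a closer
lemma pv_excl (cs : List Char) (i : Nat)
    (h4 : PySem.List.slice cs (some (i : Int)) (some ((i : Int) + 4)) = "<div".toList)
    (h6 : PySem.List.slice cs (some (i : Int)) (some ((i : Int) + 6)) = "</div>".toList) : False := by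
  rw [PySem.List.slice_toNat _ (by omega) (by omega)] at h4 h6
  have e4 : ((i : Int) + 4).toNat - (i : Int).toNat = 4 := by omega
  have e6 : ((i : Int) + 6).toNat - (i : Int).toNat = 6 := by omega
  rw [e4] at h4; rw [e6] at h6
  have := congrArg (List.take 4) h6
  rw [List.take_take] at this
  simp only [show min 4 6 = 4 from rfl] at this
  rw [h4] at this
  exact absurd this (by decide)

lemma pv_merge_nil (opens : List Int) (d : Int) : pvMergeB opens [] d = -1 := by
  cases opens <;> (rw [pvMergeB])

lemma pv_merge_cons_open (o : Int) (otl closes : List Int) (d : Int)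
    (h : ∀ c ∈ closes, o < c) :
    pvMergeB (o :: otl) closes d = pvMergeB otl closes (d + 1) := by
  cases closes with
  | nil => rw [pv_merge_nil, pv_merge_nil]
  | cons c ctl =>
    rw [pvMergeB]
    simp only [if_pos (h c (List.mem_cons_self))]

lemma pv_merge_cons_close (opens : List Int) (c : Int) (ctl : List Int) (d : Int)
    (h : ∀ o ∈ opens, c < o) :
    pvMergeB opens (c :: ctl) d = if d - 1 = 0 then c + 6 else pvMergeB opens ctl (d - 1) := by
  cases opens with
  | nil => rw [pvMergeB]
  | cons o otl =>
    rw [pvMergeB]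
    simp only [if_neg (by have := h o (List.mem_cons_self); omega : ¬ o < c)]

-- the core invariant: A's scan from i equals B's merge over the events at positions ≥ i
lemma pv_loop_eq_merge (cs : List Char) (k : Nat) :
    ∀ (i : Nat) (d : Int), cs.length - i ≤ k →
    pvLoopA cs i d =
      pvMergeB
        ((PySem.List.pyRange (i : Int) (cs.length : Int) 1).filter
          (fun j => decide (PySem.List.slice cs (some j) (some (j + 4)) = "<div".toList)))
        ((PySem.List.pyRange (i : Int) (cs.length : Int) 1).filter
          (fun j => decide (PySem.List.slice cs (some j) (some (j + 6)) = "</div>".toList))) d := by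
  induction k with
  | zero =>
    intro i d hk
    have hge : ¬ i < cs.length := by omega
    rw [pvLoopA, dif_neg hge,
        PySem.List.pyRange_one_eq_nil (by exact_mod_cast Nat.le_of_not_lt hge),
        List.filter_nil, List.filter_nil, pv_merge_nil]
  | succ k ih =>
    intro i d hk
    by_cases hlt : i < cs.length
    · have hlt' : (i : Int) < (cs.length : Int) := by exact_mod_cast hlt
      have hmemgt : ∀ p : Int → Bool, ∀ x ∈ (PySem.List.pyRange ((i : Int) + 1) (cs.length : Int) 1).filter p, (i : Int) < x := by
        intro p x hx
        have := (PySem.List.mem_pyRange_one.mp (List.mem_filter.mp hx).1).1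
        omega
      have hcast : (i : Int) + 1 = ((i + 1 : Nat) : Int) := by push_cast; ring
      rw [pvLoopA, dif_pos hlt, PySem.List.pyRange_one_cons hlt', List.filter_cons, List.filter_cons]
      by_cases h4 : PySem.List.slice cs (some (i : Int)) (some ((i : Int) + 4)) = "<div".toList
      · have h6 : ¬ PySem.List.slice cs (some (i : Int)) (some ((i : Int) + 6)) = "</div>".toList :=
          fun h6 => pv_excl cs i h4 h6
        simp only [h4, h6, decide_true, decide_false, Bool.false_eq_true, if_true, if_false]
        rw [pv_merge_cons_open _ _ _ _ (hmemgt _), hcast]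
        exact ih (i + 1) (d + 1) (by omega)
      · simp only [h4, decide_false, Bool.false_eq_true, if_false]
        by_cases h6 : PySem.List.slice cs (some (i : Int)) (some ((i : Int) + 6)) = "</div>".toList
        · simp only [h6, decide_true, if_true]
          rw [pv_merge_cons_close _ _ _ _ (hmemgt _)]
          by_cases hd : d - 1 = 0
          · simp only [hd, if_true]
          · simp only [hd, if_false, hcast]
            exact ih (i + 1) (d - 1) (by omega)
        · simp only [h6, decide_false, Bool.false_eq_true, if_false]
          rw [hcast]
          exact ih (i + 1) d (by omega)
    · have hge := Nat.le_of_not_lt hlt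
      rw [pvLoopA, dif_neg hlt,
          PySem.List.pyRange_one_eq_nil (by exact_mod_cast hge),
          List.filter_nil, List.filter_nil, pv_merge_nil]

-- ===== VERDICT (by name: the statement is the Claim_ definition above) =====
theorem extract_div_py_spec : Claim_equal_extract_div_py := by
  intro html_text css_class _
  unfold Spec_extract_div_py extract_div_py extract_div_py_alt
  simp only []
  by_cases hstart : PySem.Str.find html_text ("<div class=\"" ++ css_class ++ "\">") < 0
  · simp only [if_pos hstart]
  · simp only [if_neg hstart]
    have h0 : 0 ≤ PySem.Str.find html_text ("<div class=\"" ++ css_class ++ "\">") := by omega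
    have hrw : PySem.Str.find html_text ("<div class=\"" ++ css_class ++ "\">") =
        ((PySem.Str.find html_text ("<div class=\"" ++ css_class ++ "\">")).toNat : Int) :=
      (Int.toNat_of_nonneg h0).symm
    rw [pv_loop_eq_merge html_text.toList html_text.toList.length
        (PySem.Str.find html_text ("<div class=\"" ++ css_class ++ "\">")).toNat 0 (by omega), ← hrw]
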